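-- pv_equiv track=rewrite | github.com/UVMichael/Hog-Contest | final_strategy.py | more_boar
-- ===== SOURCE A (Python) =====
-- def more_boar(player_score, opponent_score):
--     """Return whether the player gets an extra turn.
--
--     player_score:   The total score of the current player.
--     opponent_score: The total score of the other player.
--
--     >>> more_boar(21, 43)
--     True
--     >>> more_boar(22, 43)
--     True
--     >>> more_boar(43, 21)
--     False
--     >>> more_boar(12, 12)
--     False
--     >>> more_boar(7, 8)
--     False
--     """
--     # BEGIN PROBLEM 4
--
--     def leftest_digit(num, index=1):
--         leftest_num = num
--
--         while leftest_num >=10**index: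
--             leftest_num = leftest_num//10
--
--         leftest_num = leftest_num % 10
--
--         return leftest_num if num >=10 or index > 1 else 0
--
--
--     return leftest_digit(player_score, 1) < leftest_digit(opponent_score, 1) and leftest_digit(player_score, 2) < leftest_digit(opponent_score, 2)
-- ===== SOURCE B (Python) =====
-- def more_boar(player_score, opponent_score):
--     """Return whether the player gets an extra turn.
--
--     String-based digit extraction: the leftmost and second-leftmost decimal
--     digits are read directly from str(n) instead of a repeated-division loop.
--     """
--     def digits2(n):
--         s = str(n)
--         if len(s) == 1:
--             return (0, int(s))
--         return (int(s[0]), int(s[1]))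
--
--     p1, p2 = digits2(player_score)
--     o1, o2 = digits2(opponent_score)
--     return p1 < o1 and p2 < o2
-- ===== Notes on version B (the rewrite author's own statement) =====
-- stated objective: simpler
-- what changed: Replaces A's repeated-division helper (called four times, each running a while-loop of floor divisions) with one string-based helper that reads the leftmost and second-leftmost digits directly from str(n); Pre_ excludes negative scores, where B's int(s[0]) hits the '-' sign and raises while A returns a value via floor // and %.
-- outside the precondition, e.g. on more_boar(-7, 12): A returns False, B raises ValueError; on more_boar(21, -43): A returns False, B raises ValueError
import Mathlib
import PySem

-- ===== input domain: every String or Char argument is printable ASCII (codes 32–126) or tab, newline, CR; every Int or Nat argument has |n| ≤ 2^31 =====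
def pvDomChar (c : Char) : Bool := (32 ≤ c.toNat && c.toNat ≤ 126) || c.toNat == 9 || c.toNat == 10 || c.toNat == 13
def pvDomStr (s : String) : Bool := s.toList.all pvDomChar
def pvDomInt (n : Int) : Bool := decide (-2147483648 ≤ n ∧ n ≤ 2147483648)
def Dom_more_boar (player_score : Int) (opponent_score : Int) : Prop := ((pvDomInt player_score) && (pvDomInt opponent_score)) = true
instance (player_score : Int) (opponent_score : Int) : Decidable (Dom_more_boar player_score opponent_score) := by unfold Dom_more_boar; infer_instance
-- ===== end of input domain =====

-- B replaces A's repeated-division digit helper with string-based digit extraction (simpler); on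
-- negative scores B raises where A returns a value, so Pre_ restricts to nonnegative scores.


-- ===== PORT A =====
-- the while-loop of `leftest_digit`: keep floor-dividing by 10 while the value is ≥ 10^k
def pvReduce (k : Nat) (x : Int) : Int :=
  if h : (10:Int) ^ k ≤ x then pvReduce k (PySem.Int.floordiv x 10) else x
termination_by x.toNat
decreasing_by
  have h1 : (1:Int) ≤ 10 ^ k := one_le_pow₀ (by norm_num)
  rw [PySem.Int.floordiv_eq_ediv_of_pos (by norm_num : (0:Int) < 10)]
  have h2 : x / 10 < x := by
    have := Int.lt_ediv_add_one_mul_self x (by norm_num : (0:Int) < 10)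
    omega
  have h3 : 0 ≤ x / 10 := Int.ediv_nonneg (by omega) (by norm_num)
  omega

-- Python's `10 ** index`; the helper is only invoked with index = 1 and 2, where 10 ^ index.toNat is exact
def leftest_digit (num : Int) (index : Int) : Int :=
  let l := pvReduce index.toNat num
  let l2 := PySem.Int.mod l 10
  if 10 ≤ num ∨ 1 < index then l2 else 0

def more_boar (player_score : Int) (opponent_score : Int) : Bool :=
  decide (leftest_digit player_score 1 < leftest_digit opponent_score 1) &&
    decide (leftest_digit player_score 2 < leftest_digit opponent_score 2)

-- ===== PORT B =====
-- int(c) for a single character c taken from str(n): its ASCII code minus 48 (exact on digit chars)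
def pvCharInt (c : Char) : Int := (c.toNat : Int) - 48

-- digits2: s = str(n); (0, int(s)) when len(s) == 1, else (int(s[0]), int(s[1]))
def pvDigits2 (n : Int) : Int × Int :=
  match (PySem.Int.toStr n).toList with
  | [c] => (0, pvCharInt c)
  | c0 :: c1 :: _ => (pvCharInt c0, pvCharInt c1)
  | [] => (0, 0)   -- unreachable: str(n) is never empty

def more_boar_alt (player_score : Int) (opponent_score : Int) : Bool :=
  let pq := pvDigits2 player_score
  let oq := pvDigits2 opponent_score
  decide (pq.1 < oq.1) && decide (pq.2 < oq.2)

-- ===== PRECONDITION & SPEC =====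
-- Pre_ excludes negative scores, on which B's int(s[0]) hits the '-' sign character and raises
-- ValueError while A returns a value through floor // and %; game scores are nonnegative.
def Pre_more_boar (player_score : Int) (opponent_score : Int) : Prop :=
  0 ≤ player_score ∧ 0 ≤ opponent_score
instance (player_score : Int) (opponent_score : Int) : Decidable (Pre_more_boar player_score opponent_score) := by unfold Pre_more_boar; infer_instance

def pvWitness_more_boar : Int × Int := (21, 43)

def Spec_more_boar (player_score : Int) (opponent_score : Int) (out : Bool) : Prop := out = more_boar_alt player_score opponent_score
instance (player_score : Int) (opponent_score : Int) (out : Bool) : Decidable (Spec_more_boar player_score opponent_score out) := by unfold Spec_more_boar; infer_instance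

-- ===== CLAIM (what is proved, stated in full; the proofs are below) =====
def Claim_equal_more_boar : Prop := ∀ (player_score : Int) (opponent_score : Int), Dom_more_boar player_score opponent_score → Pre_more_boar player_score opponent_score → Spec_more_boar player_score opponent_score (more_boar player_score opponent_score)

-- ===== LEMMAS AND PROOFS =====

-- proof-only clean spec of Nat.toDigits 10
def pvDigs (m : Nat) : List Char :=
  if m < 10 then [Nat.digitChar m] else pvDigs (m / 10) ++ [Nat.digitChar (m % 10)]
termination_by m
decreasing_by exact Nat.div_lt_self (by omega) (by norm_num)

theorem pvToDigitsCore_eq (f : Nat) : ∀ (m : Nat) (acc : List Char), m < 10 ^ (f + 1) →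
    Nat.toDigitsCore 10 (f + 1) m acc = pvDigs m ++ acc := by
  induction f with
  | zero =>
    intro m acc h
    have h10 : m < 10 := by omega
    have hz : m / 10 = 0 := Nat.div_eq_of_lt h10
    rw [Nat.toDigitsCore, pvDigs]
    simp [hz, Nat.mod_eq_of_lt h10, h10]
  | succ f ih =>
    intro m acc h
    by_cases h10 : m < 10
    · have hz : m / 10 = 0 := Nat.div_eq_of_lt h10
      rw [Nat.toDigitsCore, pvDigs]
      simp [hz, Nat.mod_eq_of_lt h10, h10]
    · have hz : ¬ m / 10 = 0 := by
        intro hc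
        omega
      rw [Nat.toDigitsCore, pvDigs]
      simp only [hz, if_false, h10, if_false]
      rw [ih (m / 10) _ (Nat.div_lt_of_lt_mul (by rw [← pow_succ']; exact h))]
      simp

theorem pvToDigits_eq (m : Nat) : Nat.toDigits 10 m = pvDigs m := by
  have hlt : m < 10 ^ (m + 1) := by
    calc m < 10 ^ m := Nat.lt_pow_self (by norm_num)
    _ ≤ 10 ^ (m + 1) := Nat.pow_le_pow_right (by norm_num) (by omega)
  simpa using pvToDigitsCore_eq m m [] hlt

theorem pvReduce_of_lt (k : Nat) (x : Int) (h : x < 10 ^ k) : pvReduce k x = x := by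
  rw [pvReduce]; simp [not_le.mpr h]

theorem pvReduce_step (k : Nat) (x : Int) (h : (10:Int) ^ k ≤ x) :
    pvReduce k x = pvReduce k (PySem.Int.floordiv x 10) := by
  rw [pvReduce]; simp [h]

-- on a natural number, the while-loop returns a natural number below 10^k
theorem pvReduce_nat (k : Nat) (m : Nat) :
    ∃ r : Nat, pvReduce k ((m : Nat) : Int) = (r : Int) ∧ r < 10 ^ k := by
  induction m using Nat.strong_induction_on with
  | _ m ih =>
    by_cases h : (m : Int) < 10 ^ k
    · refine ⟨m, pvReduce_of_lt k _ h, ?_⟩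
      exact_mod_cast (by push_cast at h ⊢; exact h : (m : Int) < ((10 ^ k : Nat) : Int))
    · push_neg at h
      have hm : 1 ≤ m := by
        have h1 : (1:Int) ≤ 10 ^ k := one_le_pow₀ (by norm_num)
        exact_mod_cast le_trans h1 h
      rw [pvReduce_step k _ h,
        show PySem.Int.floordiv (m : Int) 10 = ((m / 10 : Nat) : Int) from
          PySem.Int.floordiv_natCast m 10]
      exact ih (m / 10) (Nat.div_lt_self (by omega) (by norm_num))

theorem pvCharInt_digitChar (d : Nat) (h : d < 10) : pvCharInt (Nat.digitChar d) = (d : Int) := by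
  interval_cases d <;> decide

-- first two characters of the decimal spelling of m ≥ 10 are exactly A's two loop results
theorem pvDigs_shape (m : Nat) (h : 10 ≤ m) :
    ∃ rest, pvDigs m =
      Nat.digitChar ((pvReduce 1 ((m:Nat) : Int)).toNat) ::
      Nat.digitChar ((pvReduce 2 ((m:Nat) : Int)).toNat % 10) :: rest := by
  induction m using Nat.strong_induction_on with
  | _ m ih =>
    by_cases h100 : m < 100
    · -- two-digit m: both loops settle immediately / after one division
      have hst : (10:Int) ^ 1 ≤ (m : Int) := by push_cast; omega
      have e1 : pvReduce 1 ((m:Nat):Int) = ((m / 10 : Nat) : Int) := by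
        rw [pvReduce_step 1 _ hst,
          show PySem.Int.floordiv (m : Int) 10 = ((m / 10 : Nat) : Int) from
            PySem.Int.floordiv_natCast m 10]
        exact pvReduce_of_lt 1 _ (by push_cast; omega)
      have e2 : pvReduce 2 ((m:Nat):Int) = (m : Int) := pvReduce_of_lt 2 _ (by push_cast; omega)
      have t1 : (pvReduce 1 ((m:Nat):Int)).toNat = m / 10 := by rw [e1]; omega
      have t2 : (pvReduce 2 ((m:Nat):Int)).toNat = m := by rw [e2]; omega
      refine ⟨[], ?_⟩
      rw [pvDigs, if_neg (by omega), pvDigs, if_pos (by omega), t1, t2]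
      simp
    · -- m ≥ 100: both loops and pvDigs recurse through m / 10
      have hst1 : (10:Int) ^ 1 ≤ (m : Int) := by push_cast; omega
      have hst2 : (10:Int) ^ 2 ≤ (m : Int) := by push_cast; omega
      have hcast : PySem.Int.floordiv ((m:Nat) : Int) 10 = ((m / 10 : Nat) : Int) :=
        PySem.Int.floordiv_natCast m 10
      obtain ⟨rest, hrest⟩ := ih (m / 10) (Nat.div_lt_self (by omega) (by norm_num)) (by omega)
      refine ⟨rest ++ [Nat.digitChar (m % 10)], ?_⟩
      rw [pvDigs, if_neg (by omega), hrest,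
        pvReduce_step 1 _ hst1, hcast, pvReduce_step 2 _ hst2, hcast]
      simp

-- B's digit pair equals the pair of A's helper calls, for a nonnegative score
theorem pvDigits2_eq (n : Int) (h : 0 ≤ n) :
    pvDigits2 n = (leftest_digit n 1, leftest_digit n 2) := by
  obtain ⟨m, rfl⟩ : ∃ m : Nat, n = (m : Int) := ⟨n.toNat, by omega⟩
  have htl : (PySem.Int.toStr ((m:Nat):Int)).toList = pvDigs m := by
    rw [PySem.Int.toList_toStr, PySem.Int.toChars, if_neg (by push_cast; omega)]
    simp [pvToDigits_eq]
  have hl1 : leftest_digit ((m:Nat):Int) 1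
      = if 10 ≤ (m:Int) then PySem.Int.mod (pvReduce 1 ((m:Nat):Int)) 10 else 0 := by
    rw [leftest_digit]
    rw [show ((1:Int)).toNat = 1 from rfl]
    by_cases hc : 10 ≤ (m : Int) <;> simp [hc]
  have hl2 : leftest_digit ((m:Nat):Int) 2 = PySem.Int.mod (pvReduce 2 ((m:Nat):Int)) 10 := by
    rw [leftest_digit]
    rw [show ((2:Int)).toNat = 2 from rfl]
    simp
  by_cases h10 : m < 10
  · -- single-digit score
    have hd : pvDigs m = [Nat.digitChar m] := by rw [pvDigs, if_pos h10]
    have e1 : pvReduce 2 ((m:Nat):Int) = (m : Int) := pvReduce_of_lt 2 _ (by push_cast; omega)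
    have hmod : PySem.Int.mod ((m:Nat):Int) 10 = (m : Int) := by
      rw [PySem.Int.mod_eq_emod_of_pos (by norm_num)]
      exact Int.emod_eq_of_lt (by omega) (by push_cast; omega)
    rw [pvDigits2, htl, hd, hl1, hl2, e1, hmod, if_neg (by push_cast; omega)]
    simp [pvCharInt_digitChar m h10]
  · -- multi-digit score
    push_neg at h10
    obtain ⟨r1, e1, b1⟩ := pvReduce_nat 1 m
    obtain ⟨r2, e2, _⟩ := pvReduce_nat 2 m
    obtain ⟨rest, hrest⟩ := pvDigs_shape m h10
    have t1 : (pvReduce 1 ((m:Nat):Int)).toNat = r1 := by rw [e1]; omega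
    have t2 : (pvReduce 2 ((m:Nat):Int)).toNat = r2 := by rw [e2]; omega
    have hmod1 : PySem.Int.mod (pvReduce 1 ((m:Nat):Int)) 10 = (r1 : Int) := by
      rw [e1, show PySem.Int.mod ((r1:Nat):Int) 10 = ((r1 % 10 : Nat) : Int) from
        PySem.Int.mod_natCast r1 10]
      exact congrArg _ (by exact_mod_cast Nat.mod_eq_of_lt (by simpa using b1))
    have hmod2 : PySem.Int.mod (pvReduce 2 ((m:Nat):Int)) 10 = ((r2 % 10 : Nat) : Int) :=
      e2 ▸ PySem.Int.mod_natCast r2 10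
    rw [pvDigits2, htl, hrest, hl1, hl2, hmod1, hmod2, if_pos (by push_cast; omega), t1, t2]
    simp [pvCharInt_digitChar r1 (by simpa using b1),
      pvCharInt_digitChar (r2 % 10) (Nat.mod_lt _ (by norm_num))]

-- ===== VERDICT (by name: the statement is the Claim_ definition above) =====
theorem more_boar_spec : Claim_equal_more_boar := by
  intro p o _ hpre
  unfold Spec_more_boar more_boar more_boar_alt
  rw [pvDigits2_eq p hpre.1, pvDigits2_eq o hpre.2]
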